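-- pv_equiv track=rewrite | github.com/MusaEkmekcioglu/projects | python exercise/howmanydigit.py | length_string
-- ===== SOURCE A (Python) =====
-- def length_string(number):
--     result = 0
--     if number == 0 or number == 1:
--         return 0
--     else:
--         for i in range(1, number):
--             index = len(str(i))
--             result += index
--         return result
-- ===== SOURCE B (Python) =====
-- def length_string(number):
--     # Closed form per digit-length group: all i with d digits in [1, number)
--     # contribute d each; O(log n) instead of A's O(n log n) loop.
--     if number <= 1:
--         return 0
--     total = 0
--     lo = 1   # smallest d-digit number, 10**(d-1)
--     d = 1
--     while lo < number:
--         hi = min(number - 1, 10 * lo - 1)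
--         total += d * (hi - lo + 1)
--         lo *= 10
--         d += 1
--     return total
-- ===== Notes on version B (the rewrite author's own statement) =====
-- stated objective: faster
-- what changed: Replaced the per-number loop summing len(str(i)) with a closed-form count per digit-length group, iterating only over digit lengths.
import Mathlib
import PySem

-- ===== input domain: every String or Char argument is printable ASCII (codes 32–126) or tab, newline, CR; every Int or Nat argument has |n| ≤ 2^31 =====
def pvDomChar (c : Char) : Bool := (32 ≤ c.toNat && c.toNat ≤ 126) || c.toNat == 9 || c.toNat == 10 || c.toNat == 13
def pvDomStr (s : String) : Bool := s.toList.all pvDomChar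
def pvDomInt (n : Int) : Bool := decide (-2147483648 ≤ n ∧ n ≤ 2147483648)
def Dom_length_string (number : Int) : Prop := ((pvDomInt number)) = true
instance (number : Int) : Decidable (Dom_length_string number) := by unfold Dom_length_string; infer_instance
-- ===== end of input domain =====

-- B replaces A's per-number loop over 1..number-1 by a closed-form count per
-- digit-length group (objective: faster, O(log n) instead of O(n log n)).

-- ===== PORT A =====
def length_string (number : Int) : Int :=
  let result : Int := 0
  if number = 0 ∨ number = 1 then 0
  else
    (PySem.List.pyRange 1 number 1).foldl
      (fun result i =>
        let index := PySem.Str.len (PySem.Int.toStr i)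
        result + index) result

-- ===== PORT B =====
-- the while-loop of Source B; the '1 ≤ lo' conjunct only makes the recursion total
-- (lo is always a power of 10 when called from length_string_alt)
def lsAltLoop (number lo d total : Int) : Int :=
  if h : lo < number ∧ 1 ≤ lo then
    lsAltLoop number (10 * lo) (d + 1)
      (total + d * (min (number - 1) (10 * lo - 1) - lo + 1))
  else total
termination_by (number - lo).toNat
decreasing_by omega

def length_string_alt (number : Int) : Int :=
  if number ≤ 1 then 0 else lsAltLoop number 1 1 0

-- ===== PRECONDITION & SPEC =====
def Spec_length_string (number : Int) (out : Int) : Prop := out = length_string_alt number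
instance (number : Int) (out : Int) : Decidable (Spec_length_string number out) := by unfold Spec_length_string; infer_instance

-- ===== CLAIM (what is proved, stated in full; the proofs are below) =====
def Claim_equal_length_string : Prop := ∀ (number : Int), Dom_length_string number → Spec_length_string number (length_string number)

-- ===== LEMMAS AND PROOFS =====

-- number of decimal digits of n (with digLen 0 = 1)
def digLen (n : Nat) : Nat :=
  if h : n < 10 then 1 else digLen (n / 10) + 1
termination_by n
decreasing_by exact Nat.div_lt_self (by omega) (by omega)

lemma tdc_len (f : Nat) : ∀ (n : Nat) (l : List Char), n < f →
    (Nat.toDigitsCore 10 f n l).length = digLen n + l.length := by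
  induction f with
  | zero => intro n l h; omega
  | succ f ih =>
    intro n l h
    rw [Nat.toDigitsCore.eq_def, digLen]
    by_cases h10 : n < 10
    · simp [Nat.div_eq_of_lt h10, h10]
      omega
    · have hne : ¬ n / 10 = 0 := by omega
      simp only [h10, hne, if_false]
      rw [ih (n / 10) _ (by omega)]
      simp [Nat.add_assoc, Nat.add_comm 1]

lemma L_eq (i : Int) (h : 1 ≤ i) :
    PySem.Str.len (PySem.Int.toStr i) = (digLen i.toNat : Int) := by
  rw [PySem.Str.len_eq, PySem.Int.toStr, PySem.Int.toChars]
  rw [if_neg (by omega)]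
  simp only [String.toList_ofList]
  rw [Nat.toDigits, tdc_len (i.toNat + 1) i.toNat [] (by omega)]
  simp

lemma digLen_eq (k : Nat) : ∀ n : Nat, 10 ^ k ≤ n → n < 10 ^ (k + 1) → digLen n = k + 1 := by
  induction k with
  | zero => intro n h1 h2; rw [digLen]; simp at h2 ⊢; omega
  | succ k ih =>
    intro n h1 h2
    have h10 : ¬ n < 10 := by
      have : (10:Nat) ^ 1 ≤ 10 ^ (k + 1) := Nat.pow_le_pow_right (by omega) (by omega)
      simp at this; omega
    rw [digLen, dif_neg h10, ih (n / 10)]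
    · rw [Nat.le_div_iff_mul_le (by omega), ← Nat.pow_succ]; exact h1
    · rw [Nat.div_lt_iff_lt_mul (by omega), ← Nat.pow_succ]; exact h2

lemma sum_digLen_const (k a b : Nat) (h1 : 10 ^ k ≤ a) (h2 : b ≤ 10 ^ (k + 1)) :
    ∑ i ∈ Finset.Ico a b, (digLen i : Int) = (k + 1) * ((b : Int) - a) ∨ b ≤ a := by
  by_cases hab : b ≤ a
  · right; exact hab
  · left
    have hc : ∀ i ∈ Finset.Ico a b, (digLen i : Int) = ((k : Int) + 1) := by
      intro i hi
      rw [Finset.mem_Ico] at hi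
      rw [digLen_eq k i (le_trans h1 hi.1) (lt_of_lt_of_le hi.2 h2)]
      push_cast; ring
    rw [Finset.sum_congr rfl hc, Finset.sum_const, Nat.card_Ico]
    simp only [nsmul_eq_mul]
    rw [Nat.cast_sub (by omega)]
    ring

-- S m = sum of digLen over 1..m
def S : Nat → Int
  | 0 => 0
  | m + 1 => S m + (digLen (m + 1) : Int)

lemma S_eq (m : Nat) : S m = ∑ i ∈ Finset.Ico 1 (m + 1), (digLen i : Int) := by
  induction m with
  | zero => simp [S]
  | succ m ih => rw [S, Finset.sum_Ico_succ_top (by omega), ← ih]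

-- A-side: the fold over range(1, m+1) computes t + S m
lemma foldA (m : Nat) : ∀ t : Int,
    (PySem.List.pyRange 1 ((m : Int) + 1) 1).foldl
      (fun result i =>
        let index := PySem.Str.len (PySem.Int.toStr i)
        result + index) t = t + S m := by
  induction m with
  | zero =>
    intro t
    rw [PySem.List.pyRange_one_eq_nil (by omega)]
    simp [S]
  | succ m ih =>
    intro t
    push_cast
    rw [PySem.List.pyRange_one_succ_right (by omega), List.foldl_append, ih]
    simp only [List.foldl]
    rw [L_eq ((m : Int) + 1) (by omega), S]
    have : ((m : Int) + 1).toNat = m + 1 := by omega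
    rw [this]; ring

-- B-side: the loop invariant
lemma loopB (fuel : Nat) : ∀ (k : Nat) (n t : Int), (n - 10 ^ k).toNat ≤ fuel →
    lsAltLoop n (10 ^ k) ((k : Int) + 1) t
      = t + ∑ i ∈ Finset.Ico (10 ^ k) n.toNat, (digLen i : Int) := by
  induction fuel with
  | zero =>
    intro k n t hf
    have hp : (1 : Int) ≤ 10 ^ k := one_le_pow₀ (by omega)
    have hn : n ≤ 10 ^ k := by omega
    rw [lsAltLoop, dif_neg (by omega)]
    have : n.toNat ≤ 10 ^ k := by
      have : ((10:Int) ^ k) = ((10 ^ k : Nat) : Int) := by push_cast; ring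
      omega
    rw [Finset.Ico_eq_empty (by simpa using this)]
    simp
  | succ fuel ih =>
    intro k n t hf
    have hp : (1 : Int) ≤ 10 ^ k := one_le_pow₀ (by omega)
    have hcast : ((10:Int) ^ k) = ((10 ^ k : Nat) : Int) := by push_cast; ring
    by_cases hg : (10 : Int) ^ k < n
    · rw [lsAltLoop, dif_pos ⟨hg, hp⟩]
      have h10 : (10 : Int) * 10 ^ k = 10 ^ (k + 1) := by ring
      have hd : ((k : Int) + 1) + 1 = ((k + 1 : Nat) : Int) + 1 := by push_cast; ring
      rw [h10, hd, ih (k + 1) n _ (by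
        have : (10:Int) ^ (k+1) = 10 * 10 ^ k := by ring
        omega)]
      have hcast1 : ((10:Int) ^ (k+1)) = ((10 ^ (k+1) : Nat) : Int) := by push_cast; ring
      have hN : ((n.toNat : Int)) = n := by omega
      by_cases hsplit : n.toNat ≤ 10 ^ (k + 1)
      · -- last group: n ≤ 10^(k+1), top part empty
        rw [Finset.Ico_eq_empty (by simpa using hsplit), Finset.sum_empty]
        have hmin : min (n - 1) ((10:Int) ^ (k + 1) - 1) = n - 1 := by omega
        rcases sum_digLen_const k (10 ^ k) n.toNat (le_refl _) hsplit with h | h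
        · rw [h, hmin, ← hcast, hN]; ring
        · exfalso; omega
      · -- full group 10^k..10^(k+1)-1, then recurse
        have hsplit' : 10 ^ (k + 1) < n.toNat := by omega
        rw [← Finset.sum_Ico_consecutive (fun i => (digLen i : Int)) (m := 10 ^ k)
          (n := 10 ^ (k + 1)) (k := n.toNat)
          (Nat.pow_le_pow_right (by omega) (by omega)) (le_of_lt hsplit')]
        have hmin : min (n - 1) ((10:Int) ^ (k + 1) - 1) = (10:Int) ^ (k + 1) - 1 := by omega
        rcases sum_digLen_const k (10 ^ k) (10 ^ (k + 1)) (le_refl _) (le_refl _) with h | h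
        · rw [h, hmin, ← hcast, ← hcast1]
          ring
        · exfalso
          have := Nat.pow_lt_pow_right (a := 10) (by omega) (Nat.lt_succ_self k)
          omega
    · rw [lsAltLoop, dif_neg (by omega)]
      have : n.toNat ≤ 10 ^ k := by omega
      rw [Finset.Ico_eq_empty (by simpa using this)]
      simp

-- ===== VERDICT (by name: the statement is the Claim_ definition above) =====
theorem length_string_spec : Claim_equal_length_string := by
  intro number _
  unfold Spec_length_string length_string length_string_alt
  by_cases h2 : 2 ≤ number
  · rw [if_neg (show ¬(number = 0 ∨ number = 1) by omega),
        if_neg (show ¬ number ≤ 1 by omega)]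
    obtain ⟨m, hm, hm1⟩ : ∃ m : Nat, number = (m : Int) + 1 ∧ 1 ≤ m :=
      ⟨(number - 1).toNat, by omega, by omega⟩
    rw [hm, foldA]
    have hB := loopB ((((m : Int) + 1) - 10 ^ 0).toNat) 0 ((m : Int) + 1) 0 (le_refl _)
    norm_num at hB
    rw [hB, S_eq]
    norm_num
  · -- number ≤ 1
    rw [if_pos (show number ≤ 1 by omega)]
    by_cases h01 : number = 0 ∨ number = 1
    · rw [if_pos h01]
    · rw [if_neg h01]
      rw [PySem.List.pyRange_one_eq_nil (by omega)]
      simp
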